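-- pv_equiv track=rewrite | github.com/Semih993/My-AI-XAUUSD-forex-algorithm | flip_direction.py | execution_generator
-- ===== SOURCE A (Python) =====
-- def execution_generator(direction):
--     execution = [0]*len(direction)
--     for i in range(len(execution)):
--         integral = 0
--         if i >= 4:
--             for j in range(4):
--                 integral = integral + direction[i-j]
--         else:
--             for j in range(i):
--                 integral = integral + direction[i-j]
--         execution[i] = integral
--     return execution
-- ===== SOURCE B (Python) =====
-- def execution_generator(direction):
--     # prefix sums: P[k] = direction[0] + ... + direction[k-1]
--     P = [0]
--     for d in direction:
--         P.append(P[-1] + d)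
--     return [P[i + 1] - P[i - 3] if i >= 4 else P[i + 1] - P[1]
--             for i in range(len(direction))]
-- ===== Notes on version B (the rewrite author's own statement) =====
-- stated objective: alternative
-- what changed: Replaces the per-index inner accumulation loops by a prefix-sum table built once, each output becoming a difference of two table lookups (reproducing the window that drops direction[0] for i<4).
import Mathlib
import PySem

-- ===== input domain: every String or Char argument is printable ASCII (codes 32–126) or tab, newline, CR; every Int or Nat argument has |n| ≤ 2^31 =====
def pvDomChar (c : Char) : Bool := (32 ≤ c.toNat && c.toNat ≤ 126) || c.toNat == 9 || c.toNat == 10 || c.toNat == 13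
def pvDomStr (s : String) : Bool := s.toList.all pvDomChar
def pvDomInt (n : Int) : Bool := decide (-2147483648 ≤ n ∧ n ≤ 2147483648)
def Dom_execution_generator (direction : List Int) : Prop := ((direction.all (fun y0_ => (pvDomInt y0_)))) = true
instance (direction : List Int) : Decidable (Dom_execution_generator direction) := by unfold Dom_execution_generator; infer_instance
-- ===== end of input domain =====

-- B replaces A's per-index inner summation loops by a prefix-sum table and lookups; same O(n) cost, different decomposition (return value only).

-- ===== PORT A =====
-- A: execution[i] = sum of the last 4 values ending at i when i >= 4, else sum of direction[i-j] for j < i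
-- (the in-place list assignment becomes a map over range; indices i-j are always in range, getD's default is never used)
def execution_generator (direction : List Int) : List Int :=
  (List.range direction.length).map (fun i =>
    if i ≥ 4 then
      (List.range 4).foldl (fun integral j => integral + direction.getD (i - j) 0) 0
    else
      (List.range i).foldl (fun integral j => integral + direction.getD (i - j) 0) 0)

-- ===== PORT B =====
-- B: prefix-sum table P with P[k] = direction[0]+…+direction[k-1] (the append loop of Source B), then lookups
def execution_generator_alt (direction : List Int) : List Int :=
  let P := direction.foldl (fun P d => P ++ [P.getLastD 0 + d]) [0]
  (List.range direction.length).map (fun i =>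
    if i ≥ 4 then P.getD (i + 1) 0 - P.getD (i - 3) 0
    else P.getD (i + 1) 0 - P.getD 1 0)

-- ===== PRECONDITION & SPEC =====
def Spec_execution_generator (direction : List Int) (out : List Int) : Prop := out = execution_generator_alt direction
instance (direction : List Int) (out : List Int) : Decidable (Spec_execution_generator direction out) := by unfold Spec_execution_generator; infer_instance

-- ===== CLAIM (what is proved, stated in full; the proofs are below) =====
def Claim_equal_execution_generator : Prop := ∀ (direction : List Int), Dom_execution_generator direction → Spec_execution_generator direction (execution_generator direction)

-- ===== LEMMAS AND PROOFS =====

-- the prefix-sum fold with a general non-empty accumulator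
theorem pvFold_aux (l : List Int) (acc : List Int) :
    l.foldl (fun P d => P ++ [P.getLastD 0 + d]) acc
      = acc ++ (List.range l.length).map (fun k => acc.getLastD 0 + ((l.take (k + 1)).sum : Int)) := by
  induction l generalizing acc with
  | nil => simp
  | cons d t ih =>
    simp only [List.foldl_cons]
    rw [ih]
    simp [List.range_succ_eq_map, List.append_assoc, Function.comp,
      add_assoc]

-- the prefix-sum fold produces exactly the list of take-sums
theorem pvPrefix_eq (l : List Int) :
    l.foldl (fun P d => P ++ [P.getLastD 0 + d]) [0]
      = (List.range (l.length + 1)).map (fun k => ((l.take k).sum : Int)) := by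
  rw [pvFold_aux]
  simp [List.range_succ_eq_map, Function.comp]

-- P.getD k 0 = sum of the first k elements, for k ≤ length
theorem pvPrefix_getD (l : List Int) (k : ℕ) (hk : k ≤ l.length) :
    ((List.range (l.length + 1)).map (fun k => ((l.take k).sum : Int))).getD k 0
      = (l.take k).sum := by
  rw [List.getD_eq_getElem?_getD]
  rw [List.getElem?_map, List.getElem?_range (by omega : k < l.length + 1)]
  simp

theorem pvSum_take_succ (l : List Int) (k : ℕ) (hk : k < l.length) :
    ((l.take (k + 1)).sum : Int) = (l.take k).sum + l.getD k 0 := by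
  rw [List.sum_take_succ l k hk, List.getD_eq_getElem?_getD, List.getElem?_eq_getElem hk]
  simp

-- A's inner loop as a difference of take-sums
theorem pvInner (l : List Int) (i m : ℕ) (hm : m ≤ i + 1) (hi : i < l.length) :
    (List.range m).foldl (fun integral j => integral + l.getD (i - j) 0) 0
      = (l.take (i + 1)).sum - (l.take (i + 1 - m)).sum := by
  induction m with
  | zero => simp
  | succ m ih =>
    rw [List.range_succ, List.foldl_append, ih (by omega)]
    simp only [List.foldl_cons, List.foldl_nil]
    have h1 : i + 1 - m = (i - m) + 1 := by omega
    have h2 : i + 1 - (m + 1) = i - m := by omega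
    have h3 := pvSum_take_succ l (i - m) (by omega)
    rw [h1, h2] at *
    omega

-- ===== VERDICT (by name: the statement is the Claim_ definition above) =====
theorem execution_generator_spec : Claim_equal_execution_generator := by
  intro direction _
  unfold Spec_execution_generator execution_generator execution_generator_alt
  rw [pvPrefix_eq]
  apply List.map_congr_left
  intro i hi
  rw [List.mem_range] at hi
  split_ifs with h4
  · rw [pvInner direction i 4 (by omega) hi,
      pvPrefix_getD direction (i + 1) (by omega),
      pvPrefix_getD direction (i - 3) (by omega)]
    have : i + 1 - 4 = i - 3 := by omega
    rw [this]
  · rw [pvInner direction i i (by omega) hi,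
      pvPrefix_getD direction (i + 1) (by omega),
      pvPrefix_getD direction 1 (by omega)]
    have : i + 1 - i = 1 := by omega
    rw [this]
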